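-- pv_equiv track=rewrite | github.com/adrianprochaska/adventofcode_2025 | 02_ex.py | check_ntimes
-- ===== SOURCE A (Python) =====
-- def check_ntimes(number, rep_hypothesis):
--     number_str = str(number)
--
--     if len(number_str) % rep_hypothesis != 0:
--         return False
--
--     len_segment = len(number_str) // rep_hypothesis
--     for i in range(2, rep_hypothesis + 1):
--         if (
--             number_str[(i - 1) * len_segment : i * len_segment]
--             != number_str[:len_segment]
--         ):
--             return False
--     return True
-- ===== SOURCE B (Python) =====
-- def check_ntimes(number, rep_hypothesis):
--     number_str = str(number)
--     len_segment, remainder = divmod(len(number_str), rep_hypothesis)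
--     return remainder == 0 and number_str[len_segment:] == number_str[: len(number_str) - len_segment]
-- ===== Notes on version B (the rewrite author's own statement) =====
-- stated objective: simpler
-- what changed: Replaces A's per-segment comparison loop over range(2, rep_hypothesis+1) by a single self-overlap test (the string shifted by one segment equals its own prefix of the same length), with divmod computing quotient and remainder at once.
-- intended difference: When rep_hypothesis <= -2 and divides len(str(number)), A returns True because its loop range is empty, while B returns False; a string can never be some segment repeated a negative number of times, so False is the intended answer. — e.g. on check_ntimes(11, -2): A returns true, B returns false
import Mathlib
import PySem

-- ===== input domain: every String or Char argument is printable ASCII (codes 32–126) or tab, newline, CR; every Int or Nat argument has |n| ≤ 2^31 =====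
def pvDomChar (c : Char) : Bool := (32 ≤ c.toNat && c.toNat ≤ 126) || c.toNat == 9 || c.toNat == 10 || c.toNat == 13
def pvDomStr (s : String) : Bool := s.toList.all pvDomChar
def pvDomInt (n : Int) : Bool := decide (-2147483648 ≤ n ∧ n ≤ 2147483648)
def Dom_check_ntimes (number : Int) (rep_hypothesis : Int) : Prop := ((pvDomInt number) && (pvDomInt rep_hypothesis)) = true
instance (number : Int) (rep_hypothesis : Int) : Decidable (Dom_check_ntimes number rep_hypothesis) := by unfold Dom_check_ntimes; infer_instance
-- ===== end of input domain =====

-- B replaces A's per-segment comparison loop by a single self-overlap test: the string is its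
-- first segment repeated iff the string shifted by one segment equals itself (objective: simpler).

-- ===== PORT A =====
def check_ntimes (number : Int) (rep_hypothesis : Int) : Bool :=
  let number_str := PySem.Int.toChars number
  if PySem.Int.mod ((number_str.length : Int)) rep_hypothesis ≠ 0 then
    false
  else
    let len_segment := PySem.Int.floordiv ((number_str.length : Int)) rep_hypothesis
    -- for i in range(2, rep_hypothesis + 1): early-return-False loop ported as List.all
    (PySem.List.pyRange 2 (rep_hypothesis + 1) 1).all (fun i =>
      PySem.List.slice number_str (some ((i - 1) * len_segment)) (some (i * len_segment))
        == PySem.List.slice number_str none (some len_segment))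

-- ===== PORT B =====
def check_ntimes_alt (number : Int) (rep_hypothesis : Int) : Bool :=
  let number_str := PySem.Int.toChars number
  match PySem.Int.divmod? ((number_str.length : Int)) rep_hypothesis with
  | none => false  -- divmod raises ZeroDivisionError here (rep_hypothesis = 0, outside Pre_)
  | some (len_segment, remainder) =>
      remainder == 0 &&
        PySem.List.slice number_str (some len_segment) none
          == PySem.List.slice number_str none (some ((number_str.length : Int) - len_segment))

-- ===== PRECONDITION & SPEC =====
-- Pre_ excludes only rep_hypothesis = 0, where Python's `divmod`/`%` raises ZeroDivisionError.
def Pre_check_ntimes (number : Int) (rep_hypothesis : Int) : Prop := rep_hypothesis ≠ 0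
instance (number : Int) (rep_hypothesis : Int) : Decidable (Pre_check_ntimes number rep_hypothesis) := by unfold Pre_check_ntimes; infer_instance

def pvWitness_check_ntimes : Int × Int := (121212, 3)

-- When rep_hypothesis ≤ -2 and divides len(str(number)), A returns True (its loop range is
-- empty) while B returns False; a string is never a segment repeated a negative number of times,
-- so False is the intended value.
def D_check_ntimes (number : Int) (rep_hypothesis : Int) : Prop :=
  rep_hypothesis ≤ -2 ∧ rep_hypothesis ∣ ((PySem.Int.toChars number).length : Int)
instance (number : Int) (rep_hypothesis : Int) : Decidable (D_check_ntimes number rep_hypothesis) := by unfold D_check_ntimes; infer_instance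

def Spec_check_ntimes (number : Int) (rep_hypothesis : Int) (out : Bool) : Prop := ¬ D_check_ntimes number rep_hypothesis → out = check_ntimes_alt number rep_hypothesis
instance (number : Int) (rep_hypothesis : Int) (out : Bool) : Decidable (Spec_check_ntimes number rep_hypothesis out) := by unfold Spec_check_ntimes; infer_instance

def pvDiffWitness_check_ntimes : Int × Int := (11, -2)
def pvDiffWitnessOut_check_ntimes : Bool × Bool := (true, false)

-- ===== CLAIM (what is proved, stated in full; the proofs are below) =====
def Claim_unchanged_check_ntimes : Prop := ∀ (number : Int) (rep_hypothesis : Int), Dom_check_ntimes number rep_hypothesis → Pre_check_ntimes number rep_hypothesis → Spec_check_ntimes number rep_hypothesis (check_ntimes number rep_hypothesis)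
def Claim_changed_check_ntimes : Prop := Dom_check_ntimes (pvDiffWitness_check_ntimes.1) (pvDiffWitness_check_ntimes.2) ∧ Pre_check_ntimes (pvDiffWitness_check_ntimes.1) (pvDiffWitness_check_ntimes.2) ∧ D_check_ntimes (pvDiffWitness_check_ntimes.1) (pvDiffWitness_check_ntimes.2) ∧ check_ntimes (pvDiffWitness_check_ntimes.1) (pvDiffWitness_check_ntimes.2) = pvDiffWitnessOut_check_ntimes.1 ∧ check_ntimes_alt (pvDiffWitness_check_ntimes.1) (pvDiffWitness_check_ntimes.2) = pvDiffWitnessOut_check_ntimes.2 ∧ pvDiffWitnessOut_check_ntimes.1 ≠ pvDiffWitnessOut_check_ntimes.2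
def Claim_exact_check_ntimes : Prop := ∀ (number : Int) (rep_hypothesis : Int), Dom_check_ntimes number rep_hypothesis → Pre_check_ntimes number rep_hypothesis → D_check_ntimes number rep_hypothesis → check_ntimes number rep_hypothesis ≠ check_ntimes_alt number rep_hypothesis

-- ===== LEMMAS AND PROOFS =====

-- str(n) is never the empty string
lemma pv_toDigitsCore_len (b : Nat) : ∀ (f n : Nat) (r : List Char), r.length ≤ (Nat.toDigitsCore b f n r).length := by
  intro f
  induction f with
  | zero => intro n r; simp [Nat.toDigitsCore]
  | succ f ih =>
    intro n r
    simp only [Nat.toDigitsCore]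
    split
    · simp
    · exact le_trans (by simp) (ih _ _)

lemma pv_toChars_ne_nil (n : Int) : PySem.Int.toChars n ≠ [] := by
  have hlen : ∀ b m : Nat, 1 ≤ (Nat.toDigits b m).length := by
    intro b m
    simp only [Nat.toDigits, Nat.toDigitsCore]
    split
    · simp
    · exact le_trans (by simp) (pv_toDigitsCore_len b _ _ _)
  unfold PySem.Int.toChars
  split
  · simp
  · intro hc
    have := hlen 10 n.toNat
    rw [hc] at this
    simp at this

-- A's loop condition restated over Nat indices: every segment equals the first one
lemma pv_all_range_iff (s : List Char) (m k : Nat) :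
    ((PySem.List.pyRange 2 ((k : Int) + 1) 1).all (fun i =>
        PySem.List.slice s (some ((i - 1) * (m : Int))) (some (i * (m : Int)))
          == PySem.List.slice s none (some (m : Int))) = true)
    ↔ (∀ j : Nat, j < k → (s.drop (j * m)).take m = s.take m) := by
  rw [List.all_eq_true]
  constructor
  · intro h j hj
    cases j with
    | zero => simp
    | succ j =>
      have hmem : ((j : Int) + 2) ∈ PySem.List.pyRange 2 ((k : Int) + 1) 1 := by
        rw [PySem.List.mem_pyRange_one]; omega
      have h2 := h _ hmem
      have e1 : ((j : Int) + 2 - 1) * (m : Int) = (((j + 1) * m : Nat) : Int) := by push_cast; ring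
      have e2 : ((j : Int) + 2) * (m : Int) = (((j + 1) * m : Nat) : Int) + (m : Int) := by push_cast; ring
      rw [e1, e2, PySem.List.slice_natCast_add, PySem.List.slice_to_natCast, beq_iff_eq] at h2
      exact h2
  · intro h i hi
    rw [PySem.List.mem_pyRange_one] at hi
    lift i to ℕ using (by omega) with j
    have hj2 : 2 ≤ j := by omega
    have e1 : ((j : Int) - 1) * (m : Int) = (((j - 1) * m : Nat) : Int) := by
      push_cast [hj2]; rw [Int.natCast_sub (by omega : 1 ≤ j)]; push_cast; ring
    have e2 : (j : Int) * (m : Int) = (((j - 1) * m : Nat) : Int) + (m : Int) := by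
      rw [Int.natCast_mul, Int.natCast_sub (by omega : 1 ≤ j)]; push_cast; ring
    rw [e1, e2, PySem.List.slice_natCast_add, PySem.List.slice_to_natCast, beq_iff_eq]
    exact h (j - 1) (by omega)

-- overlap → all segments equal the first, by induction along the segments
lemma pv_segs_of_overlap (s : List Char) (m k : Nat) (hm : 0 < m) (hlen : s.length = m * k)
    (hov : s.drop m = s.take (s.length - m)) :
    ∀ j, j < k → (s.drop (j * m)).take m = s.take m := by
  intro j
  induction j with
  | zero => intro _; simp
  | succ j ih =>
    intro hj
    have hjk : j < k := by omega
    have step : (s.drop ((j + 1) * m)).take m = (s.drop (j * m)).take m := by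
      have h1 : s.drop ((j + 1) * m) = (s.drop m).drop (j * m) := by
        rw [List.drop_drop]; ring_nf
      rw [h1, hov, List.drop_take, List.take_take]
      have h2 : (j + 2) * m ≤ m * k := by
        rw [Nat.mul_comm m k]
        exact Nat.mul_le_mul_right m (by omega)
      have h3 : (j + 2) * m = j * m + 2 * m := by ring
      congr 1
      omega
    rw [step]; exact ih hjk

-- all segments equal the first → overlap, pointwise via getElem
lemma pv_overlap_of_segs (s : List Char) (m k : Nat) (hm : 0 < m) (hlen : s.length = m * k)
    (hseg : ∀ j, j < k → (s.drop (j * m)).take m = s.take m) :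
    s.drop m = s.take (s.length - m) := by
  rcases Nat.eq_zero_or_pos k with hk | hk
  · subst hk; simp_all [List.eq_nil_of_length_eq_zero (by omega : s.length = 0)]
  have hcomm : m * k = k * m := Nat.mul_comm m k
  have hper : ∀ i, i + m < s.length → s[i + m]? = s[i]? := by
    intro i hi
    have hjm : i / m < k := (Nat.div_lt_iff_lt_mul hm).mpr (by omega)
    have hr : i % m < m := Nat.mod_lt _ hm
    have hdm0 := Nat.div_add_mod i m
    have hdecomp : i = i / m * m + i % m := by
      rw [Nat.mul_comm] at hdm0; omega
    -- s[i] = (seg (i/m))[i%m] = (take m s)[i%m] and s[i+m] = (seg (i/m+1))[i%m]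
    have hidx : ∀ j, j < k → ∀ r, r < m → s[j * m + r]? = (s.take m)[r]? := by
      intro j hjk r hr
      have := hseg j hjk
      calc s[j * m + r]? = (s.drop (j * m))[r]? := by
              rw [List.getElem?_drop]
           _ = ((s.drop (j * m)).take m)[r]? := by
              rw [List.getElem?_take_of_lt hr]
           _ = (s.take m)[r]? := by rw [this]
    have hik : i / m + 1 < k := by
      have hmul : (i / m + 1) * m = i / m * m + m := by ring
      exact Nat.lt_of_mul_lt_mul_right (a := m) (by omega : (i / m + 1) * m < k * m)
    have e1 : i + m = (i / m + 1) * m + i % m := by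
      have hmul : (i / m + 1) * m = i / m * m + m := by ring
      omega
    rw [e1, hidx _ hik _ hr]
    conv_rhs => rw [hdecomp]
    rw [hidx _ hjm _ hr]
  -- pointwise equality of the two lists
  apply List.ext_getElem?
  intro i
  by_cases hi : i < s.length - m
  · rw [List.getElem?_drop, List.getElem?_take_of_lt hi,
      show m + i = i + m from Nat.add_comm m i]
    exact hper i (by omega)
  · have h1 : (s.drop m).length ≤ i := by simp; omega
    have h2 : (s.take (s.length - m)).length ≤ i := by simp; omega
    rw [List.getElem?_eq_none h1, List.getElem?_eq_none h2]

-- ===== VERDICT (by name: the statement is the Claim_ definition above) =====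
theorem check_ntimes_spec : Claim_unchanged_check_ntimes := by
  intro number rep hdom hpre hnd
  show check_ntimes number rep = check_ntimes_alt number rep
  have hdm : PySem.Int.divmod? ((PySem.Int.toChars number).length : Int) rep
      = some (PySem.Int.floordiv ((PySem.Int.toChars number).length : Int) rep,
              PySem.Int.mod ((PySem.Int.toChars number).length : Int) rep) := by
    simp only [PySem.Int.divmod?]
    rw [if_neg hpre]
    rfl
  by_cases hdvd : rep ∣ ((PySem.Int.toChars number).length : Int)
  · have hmod : PySem.Int.mod ((PySem.Int.toChars number).length : Int) rep = 0 :=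
      (PySem.Int.mod_eq_zero_iff_dvd _ _).mpr hdvd
    rcases lt_trichotomy rep 0 with hneg | h0 | hpos
    · -- rep < 0 and rep ∣ len; ¬D_ forces rep = -1
      have hrep1 : rep = -1 := by
        by_contra h
        exact hnd ⟨by omega, hdvd⟩
      subst hrep1
      have hrange : PySem.List.pyRange 2 (-1 + 1) 1 = [] :=
        List.eq_nil_of_length_eq_zero (by rw [PySem.List.length_pyRange_one]; omega)
      have hfd : PySem.Int.floordiv ((PySem.Int.toChars number).length : Int) (-1)
          = -((PySem.Int.toChars number).length : Int) := by
        have := PySem.Int.floordiv_mul_add_mod ((PySem.Int.toChars number).length : Int) (-1)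
        rw [hmod] at this; omega
      simp only [check_ntimes, check_ntimes_alt, hdm, hmod, hfd, ne_eq, not_true_eq_false,
        if_false, hrange, List.all_nil, Bool.true_eq]
      set s := PySem.Int.toChars number
      have h1 : PySem.List.slice s (some (-(s.length : Int))) none = s := by
        rcases Nat.eq_zero_or_pos s.length with h | h
        · simp [List.eq_nil_of_length_eq_zero h, PySem.List.slice]
        · rw [show (-(s.length : Int)) = -((s.length : Nat) : Int) from rfl,
            PySem.List.slice_from_neg_natCast _ _ h]
          simp
      have h2 : PySem.List.slice s none (some ((s.length : Int) - -(s.length : Int))) = s := by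
        rw [show ((s.length : Int) - -(s.length : Int)) = ((s.length + s.length : Nat) : Int) from by push_cast; ring,
          PySem.List.slice_to_natCast]
        simp
      rw [h1, h2]
      simp
    · exact absurd h0 hpre
    · lift rep to ℕ using (le_of_lt hpos) with k
      have hk : 0 < k := by exact_mod_cast hpos
      have hdvdN : k ∣ (PySem.Int.toChars number).length := by exact_mod_cast hdvd
      simp only [check_ntimes, check_ntimes_alt, hdm, hmod, ne_eq, not_true_eq_false, if_false,
        beq_self_eq_true, Bool.true_and]
      rw [PySem.Int.floordiv_natCast]
      set s := PySem.Int.toChars number with hsdef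
      set m := s.length / k with hmdef
      have hm : 0 < m := Nat.div_pos (Nat.le_of_dvd (List.length_pos_iff.mpr (pv_toChars_ne_nil number)) hdvdN) hk
      have hlen : s.length = m * k := (Nat.div_mul_cancel hdvdN).symm
      have hfrom : PySem.List.slice s (some ((m : Nat) : Int)) none = s.drop m :=
        PySem.List.slice_from_natCast ..
      have hto : PySem.List.slice s none (some ((s.length : Int) - ((m : Nat) : Int)))
          = s.take (s.length - m) := by
        rw [show ((s.length : Int) - ((m : Nat) : Int)) = (((s.length - m : Nat)) : Int) from by
              rw [Int.natCast_sub (by simpa [hmdef] using Nat.div_le_self s.length k : m ≤ s.length)],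
          PySem.List.slice_to_natCast]
      rw [hfrom, hto, Bool.eq_iff_iff, beq_iff_eq, pv_all_range_iff s m k]
      exact ⟨fun h => pv_overlap_of_segs s m k hm hlen h,
             fun h => pv_segs_of_overlap s m k hm hlen h⟩
  · have hmodne : PySem.Int.mod ((PySem.Int.toChars number).length : Int) rep ≠ 0 :=
      fun h => hdvd ((PySem.Int.mod_eq_zero_iff_dvd _ _).mp h)
    simp [check_ntimes, check_ntimes_alt, hdm, hmodne]

theorem check_ntimes_changed : Claim_changed_check_ntimes := by
  unfold Claim_changed_check_ntimes; decide

theorem check_ntimes_tight : Claim_exact_check_ntimes := by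
  intro number rep hdom hpre hD
  obtain ⟨hneg, hdvd⟩ := hD
  have hmod : PySem.Int.mod ((PySem.Int.toChars number).length : Int) rep = 0 :=
    (PySem.Int.mod_eq_zero_iff_dvd _ _).mpr hdvd
  have hdm : PySem.Int.divmod? ((PySem.Int.toChars number).length : Int) rep
      = some (PySem.Int.floordiv ((PySem.Int.toChars number).length : Int) rep,
              PySem.Int.mod ((PySem.Int.toChars number).length : Int) rep) := by
    simp only [PySem.Int.divmod?]
    rw [if_neg hpre]
    rfl
  have hrange : PySem.List.pyRange 2 (rep + 1) 1 = [] :=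
    List.eq_nil_of_length_eq_zero (by rw [PySem.List.length_pyRange_one]; omega)
  have hA : check_ntimes number rep = true := by
    simp [check_ntimes, hmod, hrange]
  have hB : check_ntimes_alt number rep = false := by
    set s := PySem.Int.toChars number with hsdef
    set q := PySem.Int.floordiv ((s.length : Int)) rep with hqdef
    have hspos : 0 < s.length := List.length_pos_iff.mpr (pv_toChars_ne_nil number)
    have hexact : q * rep = (s.length : Int) := by
      have := PySem.Int.floordiv_mul_add_mod ((s.length : Int)) rep
      rw [← hqdef, hmod] at this; omega
    -- q = -(len / |rep|) < 0 and |q| * 2 ≤ len, so the two slices have different lengths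
    have hqneg : q < 0 := by nlinarith
    have hqlen : 2 * (-q) ≤ (s.length : Int) := by nlinarith
    obtain ⟨p, hp⟩ : ∃ p : Nat, q = -(p : Int) := ⟨(-q).toNat, by omega⟩
    have hppos : 0 < p := by omega
    have hplen : 2 * p ≤ s.length := by exact_mod_cast (by omega : (2 * p : Int) ≤ (s.length : Int))
    simp only [check_ntimes_alt, hdm, ← hsdef, hmod, beq_self_eq_true, Bool.true_and]
    rw [hp, PySem.List.slice_from_neg_natCast _ _ hppos,
      show ((s.length : Int) - -(p : Int)) = ((s.length + p : Nat) : Int) from by push_cast; ring,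
      PySem.List.slice_to_natCast]
    rw [beq_eq_false_iff_ne]
    intro heq
    have := congrArg List.length heq
    simp at this
    omega
  rw [hA, hB]; simp
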